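-- pv_equiv track=rewrite | github.com/kh277/BOJ | 백준/Platinum/17131. 여우가 정보섬에 올라온 이유/여우가 정보섬에 올라온 이유.py | solve
-- ===== SOURCE A (Python) =====
-- MAX = 200000*2+1        # x좌표는 -20만 ~ 20만이므로 인덱스는 0 ~ 40만 부분에 저장
--
-- def update(N, tree, index, value):
--     index += N
--     tree[index] += value
--
--     while index > 1:
--         index >>= 1
--         tree[index] = tree[index<<1] + tree[index<<1 | 1]
--
-- def query(N, tree, left, right):
--     result = 0
--     left += N
--     right += N
--
--     if left > right:
--         return result
--
--     while left <= right:
--         if left & 1: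
--             result += tree[left]
--             left += 1
--         if ~right & 1:
--             result += tree[right]
--             right -= 1
--
--         left >>= 1
--         right >>= 1
--
--     return result
--
-- def solve(N, point):
--     # y좌표가 작아지도록, x좌표가 커지도록 정렬
--     point.sort(key= lambda x: (-x[1], x[0]))
--
--     # 세그먼트 트리 기본 설정
--     tree = [0 for _ in range(MAX*2)]
--
--     # y좌표가 큰 점부터 세그먼트 트리에 추가 및 쿼리 처리
--     result = 0
--     curY = point[0][1]
--     temp = []
--     for i in range(N):
--         # 이전에 탐색했던 점의 y좌표와 같다면 -> x좌표를 temp에 저장하고 쿼리 실행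
--         if curY == point[i][1]:
--             temp.append(point[i][0])
--         # 이전에 탐색했던 점의 y좌표보다 크다면 -> 같은 y좌표의 점들 전부 트리에 추가
--         else:
--             for j in temp:
--                 update(MAX, tree, j+MAX//2, 1)
--             curY = point[i][1]
--             temp = [point[i][0]]        # temp 배열 초기화
--
--         # 자기 자신의 x좌표를 제외한 좌상단 및 우상단 별의 개수를 누적하여 저장
--         result += (query(MAX, tree, point[i][0]+MAX//2+1, MAX-1) * query(MAX, tree, 0, point[i][0]+MAX//2-1)) % 1000000007
--
--     return (result) % 1000000007
-- ===== SOURCE B (Python) =====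
-- def solve(N, point):
--     # same in-place sort as the original (side effect on `point` preserved)
--     point.sort(key=lambda p: (-p[1], p[0]))
--     MOD = 1000000007
--     result = 0
--     inserted = []        # x's of points whose y is strictly larger than the current y
--     pending = []         # x's of the current equal-y batch (not yet counted)
--     curY = point[0][1]
--     for i in range(N):
--         x, y = point[i]
--         if y != curY:
--             inserted.extend(pending)
--             pending = []
--             curY = y
--         pending.append(x)
--         left = sum(1 for v in inserted if v < x)
--         right = sum(1 for v in inserted if v > x)
--         result += (right * left) % MOD
--     return result % MOD
-- ===== Notes on version B (the rewrite author's own statement) =====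
-- stated objective: simpler
-- what changed: Replaces the 800002-slot iterative segment tree (bit-twiddling update/query loops over heap indices) by a plain list of the already-inserted x-coordinates, with the two counts per point obtained by direct comparison scans.
-- outside the precondition, e.g. on solve(3, [(6, 1), (-408932, 2), (10, 0)]): A returns 1, B returns 0
import Mathlib
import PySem

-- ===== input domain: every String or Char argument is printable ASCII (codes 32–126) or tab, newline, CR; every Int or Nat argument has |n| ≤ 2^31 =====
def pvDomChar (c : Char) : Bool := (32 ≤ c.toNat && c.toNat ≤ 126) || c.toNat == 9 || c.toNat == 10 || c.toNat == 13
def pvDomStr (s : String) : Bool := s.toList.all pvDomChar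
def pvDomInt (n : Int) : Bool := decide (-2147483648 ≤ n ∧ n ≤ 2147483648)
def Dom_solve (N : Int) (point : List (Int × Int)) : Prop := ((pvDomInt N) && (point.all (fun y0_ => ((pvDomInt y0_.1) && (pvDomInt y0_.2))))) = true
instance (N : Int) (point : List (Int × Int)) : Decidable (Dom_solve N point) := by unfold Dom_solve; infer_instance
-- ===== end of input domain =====

-- B replaces A's 800002-slot iterative segment tree by a plain list of the already-inserted
-- x-coordinates, counted directly per point (objective: simpler).  Both A and B sort `point`
-- in place with the same key, so both have the same side effect on the argument; the
-- equivalence proved here is about the return value.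

-- ===== PORT A =====
-- A-side helpers = A's module-level functions update/query.  The tree (Python: a list of
-- 800002 zeros with item reads/writes) is modelled as a map from cell index to cell value
-- (missing key = untouched cell = 0); on every input admitted by Pre_solve every tree index Python touches is nonnegative
-- and in bounds (and .toNat is exact), so the two representations agree cell by cell.

def pvTget (t : Std.HashMap Nat Int) (i : Nat) : Int := t.getD i 0


def pvTset (t : Std.HashMap Nat Int) (i : Nat) (v : Int) : Std.HashMap Nat Int := t.insert i v


def updLoop (t : Std.HashMap Nat Int) (index : Nat) : Std.HashMap Nat Int :=
  if 1 < index then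
    updLoop (pvTset t (index >>> 1) (pvTget t (2 * (index >>> 1)) + pvTget t (2 * (index >>> 1) + 1))) (index >>> 1)
  else t
termination_by index
decreasing_by simp [Nat.shiftRight_one]; omega


def update (n : Nat) (t : Std.HashMap Nat Int) (index : Nat) (value : Int) : Std.HashMap Nat Int :=
  let index := index + n
  updLoop (pvTset t index (pvTget t index + value)) index


def qLoop (t : Std.HashMap Nat Int) (fuel : Nat) (l r : Nat) (res : Int) : Int :=
  match fuel with
  | 0 => res
  | fuel + 1 =>
    if l ≤ r then
      let s1 := if l % 2 = 1 then (res + pvTget t l, l + 1) else (res, l)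
      let s2 := if r % 2 = 0 then (s1.1 + pvTget t r, r - 1) else (s1.1, r)
      qLoop t fuel (s1.2 >>> 1) (s2.2 >>> 1) s2.1
    else res


def query (n : Nat) (t : Std.HashMap Nat Int) (left right : Int) : Int :=
  let l := left + (n : Int)
  let r := right + (n : Int)
  if l > r then 0 else qLoop t 64 l.toNat r.toNat 0


def stepA (st : Std.HashMap Nat Int × Int × List Int × Int) (p : Int × Int) : Std.HashMap Nat Int × Int × List Int × Int :=
  match st with
  | (tree, curY, temp, result) =>
    let st1 :=
      if curY = p.2 then (tree, curY, temp ++ [p.1])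
      else (temp.foldl (fun t j => update 400001 t (j + 200000).toNat 1) tree, p.2, [p.1])
    (st1.1, st1.2.1, st1.2.2,
      result + PySem.Int.mod
        (query 400001 st1.1 (p.1 + 200000 + 1) (400001 - 1) *
         query 400001 st1.1 0 (p.1 + 200000 - 1)) 1000000007)


def solve (N : Int) (point : List (Int × Int)) : Int :=
  let s := PySem.List.sorted2 point (fun p => -p.2) (fun p => p.1)
  let tree : Std.HashMap Nat Int := ∅   -- [0 for _ in range(MAX*2)]: all cells 0
  let st := (PySem.List.pyRange 0 N 1).foldl
      (fun st i => stepA st (PySem.List.pyGetD s i ((0 : Int), (0 : Int))))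
      (tree, (PySem.List.pyGetD s 0 ((0 : Int), (0 : Int))).2, ([] : List Int), (0 : Int))
  PySem.Int.mod st.2.2.2 1000000007


-- ===== PORT B =====
-- B-side helper = the loop body of Source B; state = (inserted, pending, curY, result)

def stepB (st : List Int × List Int × Int × Int) (p : Int × Int) : List Int × List Int × Int × Int :=
  match st with
  | (inserted, pending, curY, result) =>
    let st1 :=
      if p.2 ≠ curY then (inserted ++ pending, ([p.1] : List Int), p.2)
      else (inserted, pending ++ [p.1], curY)
    let left : Int := (st1.1.countP (fun v => decide (v < p.1)) : Int)
    let right : Int := (st1.1.countP (fun v => decide (p.1 < v)) : Int)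
    (st1.1, st1.2.1, st1.2.2, result + PySem.Int.mod (right * left) 1000000007)


def solve_alt (N : Int) (point : List (Int × Int)) : Int :=
  let s := PySem.List.sorted2 point (fun p => -p.2) (fun p => p.1)
  let st := (PySem.List.pyRange 0 N 1).foldl
      (fun st i => stepB st (PySem.List.pyGetD s i ((0 : Int), (0 : Int))))
      (([] : List Int), ([] : List Int), (PySem.List.pyGetD s 0 ((0 : Int), (0 : Int))).2, (0 : Int))
  PySem.Int.mod st.2.2.2 1000000007


-- ===== PRECONDITION & SPEC =====
-- Pre_ = the problem's natural domain: a nonempty list (A indexes point[0]), N at most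
-- len(point) (A indexes point[i] for i < N), and |x| ≤ 200000 (the problem's stated coordinate
-- range = the index space of A's fixed-size tree).  Outside this range A either raises
-- IndexError on the fixed-size tree or returns values distorted by Python's negative-index
-- wraparound, so those inputs are excluded.
def Pre_solve (N : Int) (point : List (Int × Int)) : Prop :=
  point ≠ [] ∧ N ≤ (point.length : Int) ∧ ∀ p ∈ point, -200000 ≤ p.1 ∧ p.1 ≤ 200000
instance (N : Int) (point : List (Int × Int)) : Decidable (Pre_solve N point) := by
  unfold Pre_solve; infer_instance

def pvWitness_solve : Int × (List (Int × Int)) := (2, [(0, 1), (1, 0)])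

def Spec_solve (N : Int) (point : List (Int × Int)) (out : Int) : Prop := out = solve_alt N point
instance (N : Int) (point : List (Int × Int)) (out : Int) : Decidable (Spec_solve N point out) := by
  unfold Spec_solve; infer_instance

-- ===== CLAIM (what is proved, stated in full; the proofs are below) =====
def Claim_equal_solve : Prop := ∀ (N : Int) (point : List (Int × Int)), Dom_solve N point → Pre_solve N point → Spec_solve N point (solve N point)

-- ===== LEMMAS AND PROOFS =====

def inRangeX (v : Int) : Prop := -200000 ≤ v ∧ v ≤ 200000


def GoodNode (t : Std.HashMap Nat Int) (p : Nat) : Prop := pvTget t p = pvTget t (2 * p) + pvTget t (2 * p + 1)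


def idxOf (v : Int) : Nat := (v + 200000).toNat


def TreeOk (t : Std.HashMap Nat Int) (L : List Int) : Prop :=
  (∀ p, 1 ≤ p → p < 400001 → GoodNode t p) ∧
  ∀ c : Nat, c < 400001 → pvTget t (400001 + c) = ((L.map idxOf).count c : Int)


def segSum (t : Std.HashMap Nat Int) (l len : Nat) : Int := ((List.range' l len).map (pvTget t)).sum


def StRel (a : Std.HashMap Nat Int × Int × List Int × Int) (b : List Int × List Int × Int × Int) : Prop :=
  a.2.1 = b.2.2.1 ∧ a.2.2.1 = b.2.1 ∧ a.2.2.2 = b.2.2.2 ∧ TreeOk a.1 b.1 ∧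
  (∀ v ∈ b.1, inRangeX v) ∧ (∀ v ∈ b.2.1, inRangeX v)


theorem tget_tset (t : Std.HashMap Nat Int) (j : Nat) (v : Int) (i : Nat) :
    pvTget (pvTset t j v) i = if i = j then v else pvTget t i := by
  unfold pvTget pvTset
  rw [Std.HashMap.getD_insert]
  by_cases h : i = j
  · simp [h]
  · simp [h, Ne.symm h]

theorem updLoop_high (t : Std.HashMap Nat Int) (I : Nat) (hI : I < 800002) :
    ∀ i, 400001 ≤ i → pvTget (updLoop t I) i = pvTget t i := by
  induction t, I using updLoop.induct with
  | case1 t I h ih =>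
    intro j hj
    have h1 : I >>> 1 = I / 2 := Nat.shiftRight_one I
    rw [updLoop]; simp only [h, if_true]
    rw [ih (by omega) j hj]
    rw [tget_tset]
    have : j ≠ I >>> 1 := by omega
    simp [this]
  | case2 t I h => intro j hj; rw [updLoop]; simp [h]


theorem updLoop_good (t : Std.HashMap Nat Int) (I : Nat) (hI : I < 800002)
    (h : ∀ p, 1 ≤ p → p < 400001 → (∀ k, 1 ≤ k → I >>> k ≠ p) → GoodNode t p) :
    ∀ p, 1 ≤ p → p < 400001 → GoodNode (updLoop t I) p := by
  induction t, I using updLoop.induct with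
  | case2 t I hlt =>
    intro p hp1 hp2
    rw [updLoop]; simp only [hlt, if_false]
    apply h p hp1 hp2
    intro k hk
    have hI1 : I ≤ 1 := by omega
    have hz : I >>> k = 0 := by
      rw [Nat.shiftRight_eq_div_pow]
      have h2 : 2 ^ 1 ≤ 2 ^ k := Nat.pow_le_pow_right (by omega) hk
      exact Nat.div_eq_of_lt (by omega)
    omega
  | case1 t I hlt ih =>
    intro p hp1 hp2
    rw [updLoop]; simp only [hlt, if_true]
    have h1 : I >>> 1 = I / 2 := Nat.shiftRight_one I
    refine ih (by omega) ?_ p hp1 hp2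
    intro q hq1 hq2 hanc
    by_cases hq : q = I >>> 1
    · subst hq
      unfold GoodNode
      rw [tget_tset, tget_tset, tget_tset]
      have e1 : 2 * (I >>> 1) ≠ I >>> 1 := by omega
      have e2 : 2 * (I >>> 1) + 1 ≠ I >>> 1 := by omega
      simp [e1, e2]
    · have hnotanc : ∀ k, 1 ≤ k → I >>> k ≠ q := by
        intro k hk
        match k with
        | 1 => exact fun hc => hq hc.symm
        | (k+2) =>
          have hadd : (1 : Nat) + (k+1) = k+2 := by omega
          have : I >>> (k+2) = (I >>> 1) >>> (k+1) := by
            rw [← hadd, Nat.shiftRight_add]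
          rw [this]; exact hanc (k+1) (by omega)
      have hgq := h q hq1 hq2 hnotanc
      unfold GoodNode at hgq ⊢
      rw [tget_tset, tget_tset, tget_tset]
      have ha2 := hanc 1 (by omega)
      rw [Nat.shiftRight_one] at ha2
      have c1 : q ≠ I >>> 1 := hq
      have c2 : 2 * q ≠ I >>> 1 := by omega
      have c3 : 2 * q + 1 ≠ I >>> 1 := by omega
      simp [c1, c2, c3, hgq]


theorem update_ok (t : Std.HashMap Nat Int) (L : List Int) (v : Int) (hok : TreeOk t L) (hv : inRangeX v) :
    TreeOk (update 400001 t (v + 200000).toNat 1) (L ++ [v]) := by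
  obtain ⟨hgood, hleaf⟩ := hok
  obtain ⟨hv1, hv2⟩ := hv
  set c : Nat := (v + 200000).toNat with hc
  have hcb : c < 400001 := by omega
  set I : Nat := c + 400001 with hIdef
  have hIb : I < 800002 := by omega
  have hIl : 400001 ≤ I := by omega
  set t1 := pvTset t I (pvTget t I + 1) with ht1
  have hh1 : I >>> 1 = I / 2 := Nat.shiftRight_one I
  refine ⟨?_, ?_⟩
  · show ∀ p, 1 ≤ p → p < 400001 → GoodNode (updLoop t1 I) p
    apply updLoop_good t1 I hIb
    intro p hp1 hp2 hanc
    have ha1 := hanc 1 (by omega)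
    rw [Nat.shiftRight_one] at ha1
    have hgp := hgood p hp1 hp2
    unfold GoodNode at hgp ⊢
    rw [ht1, tget_tset, tget_tset, tget_tset]
    have c1 : p ≠ I := by omega
    have c2 : 2 * p ≠ I := by omega
    have c3 : 2 * p + 1 ≠ I := by omega
    simp [c1, c2, c3, hgp]
  · intro c' hc'
    show pvTget (updLoop t1 I) (400001 + c') = _
    rw [updLoop_high t1 I hIb _ (by omega)]
    rw [ht1, tget_tset]
    rw [List.map_append, List.count_append]
    simp only [List.map_cons, List.map_nil, List.count_cons, List.count_nil]
    have hidx : idxOf v = c := by simp [idxOf, ← hc]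
    by_cases h : 400001 + c' = I
    · rw [if_pos h, ← h, hleaf c' hc']
      have hbeq : (idxOf v == c') = true := by
        rw [hidx]; simp; omega
      simp [hbeq]
    · rw [if_neg h, hleaf c' hc']
      have hbeq : (idxOf v == c') = false := by
        rw [hidx]; simp; omega
      simp [hbeq]


theorem flush_ok (temp : List Int) (t : Std.HashMap Nat Int) (L : List Int) (hok : TreeOk t L)
    (htemp : ∀ v ∈ temp, inRangeX v) :
    TreeOk (temp.foldl (fun t j => update 400001 t (j + 200000).toNat 1) t) (L ++ temp) := by
  induction temp generalizing t L with
  | nil => simpa using hok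
  | cons v temp ih =>
    simp only [List.foldl_cons]
    have : L ++ v :: temp = (L ++ [v]) ++ temp := by simp
    rw [this]
    exact ih _ _ (update_ok t L v hok (htemp v (by simp))) (fun w hw => htemp w (by simp [hw]))


theorem segSum_zero (t : Std.HashMap Nat Int) (l : Nat) : segSum t l 0 = 0 := rfl


theorem segSum_one (t : Std.HashMap Nat Int) (l : Nat) : segSum t l 1 = pvTget t l := by
  simp [segSum]


theorem segSum_split (t : Std.HashMap Nat Int) (l a b : Nat) :
    segSum t l (a + b) = segSum t l a + segSum t (l + a) b := by
  unfold segSum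
  rw [← List.range'_append_1, List.map_append, List.sum_append]


theorem tsum_double (t : Std.HashMap Nat Int) (a k : Nat)
    (h : ∀ p, a ≤ p → p < a + k → GoodNode t p) :
    segSum t (2 * a) (2 * k) = segSum t a k := by
  induction k with
  | zero => rfl
  | succ k ih =>
    have e1 : 2 * (k + 1) = (2 * k + 1) + 1 := by omega
    have e2 : 2 * k + 1 = 2 * k + 1 := rfl
    rw [e1]
    have hsplit1 : segSum t (2*a) ((2*k+1)+1) = segSum t (2*a) (2*k) + segSum t (2*a+2*k) 1 + segSum t (2*a+2*k+1) 1 := by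
      rw [segSum_split t (2*a) (2*k+1) 1, segSum_split t (2*a) (2*k) 1]
      have : 2*a + (2*k+1) = 2*a+2*k+1 := by omega
      rw [this]
    rw [hsplit1, segSum_split t a k 1, ih (fun p hp1 hp2 => h p hp1 (by omega))]
    have hg := h (a+k) (by omega) (by omega)
    unfold GoodNode at hg
    rw [segSum_one, segSum_one, segSum_one]
    have e3 : 2*(a+k) = 2*a+2*k := by ring
    rw [e3] at hg
    omega


theorem qstep_sum (t : Std.HashMap Nat Int) (hgood : ∀ p, 1 ≤ p → p < 400001 → GoodNode t p)
    (l r : Nat) (h1 : 1 ≤ l) (hlr : l ≤ r) (hr : r < 800002) :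
    segSum t l (r + 1 - l)
      = (if l % 2 = 1 then pvTget t l else 0) + (if r % 2 = 0 then pvTget t r else 0)
        + segSum t ((if l % 2 = 1 then l + 1 else l) >>> 1)
            ((if r % 2 = 0 then r - 1 else r) >>> 1 + 1 - (if l % 2 = 1 then l + 1 else l) >>> 1) := by
  set l2 := if l % 2 = 1 then l + 1 else l with hl2
  set r2 := if r % 2 = 0 then r - 1 else r with hr2
  have hl2e : l2 % 2 = 0 := by rw [hl2]; split_ifs <;> omega
  have hr2o : r2 % 2 = 1 := by rw [hr2]; split_ifs <;> omega
  have hl2b : l ≤ l2 ∧ l2 ≤ l + 1 := by rw [hl2]; split_ifs <;> omega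
  have hr2b : r - 1 ≤ r2 ∧ r2 ≤ r := by rw [hr2]; split_ifs <;> omega
  have hle : l2 ≤ r2 + 1 := by
    rw [hl2, hr2]; split_ifs <;> omega
  have hsh_l : l2 >>> 1 = l2 / 2 := Nat.shiftRight_one l2
  have hsh_r : r2 >>> 1 = r2 / 2 := Nat.shiftRight_one r2
  -- step 2: collapse the even-aligned block [l2, r2] to its parents
  have hstep2 : segSum t l2 (r2 + 1 - l2) = segSum t (l2 >>> 1) (r2 >>> 1 + 1 - l2 >>> 1) := by
    rcases Nat.lt_or_ge r2 l2 with hempty | hne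
    · have hz1 : r2 + 1 - l2 = 0 := by omega
      have hz2 : r2 >>> 1 + 1 - l2 >>> 1 = 0 := by rw [hsh_l, hsh_r]; omega
      rw [hz1, hz2, segSum_zero, segSum_zero]
    · have h2a : 2 * (l2 / 2) = l2 := by omega
      have h2k : 2 * ((r2 + 1 - l2) / 2) = r2 + 1 - l2 := by omega
      have hd := tsum_double t (l2 / 2) ((r2 + 1 - l2) / 2) ?hg
      · rw [h2a, h2k] at hd
        rw [hd, hsh_l, hsh_r]
        have : r2 / 2 + 1 - l2 / 2 = (r2 + 1 - l2) / 2 := by omega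
        rw [this]
      · case hg =>
        intro p hp1 hp2
        apply hgood p (by omega) (by omega)
  -- step 1: peel the odd left cell and/or even right cell
  by_cases hl : l % 2 = 1 <;> by_cases hrp : r % 2 = 0 <;>
    simp only [hl, hrp, if_true, if_false] at hl2 hr2 ⊢
  · -- l odd, r even : l < r
    have hlr' : l < r := by omega
    have e : r + 1 - l = 1 + ((r2 + 1 - l2) + 1) := by omega
    rw [e, segSum_split t l 1 ((r2+1-l2)+1), segSum_split t (l+1) (r2+1-l2) 1]
    have e2 : l + 1 = l2 := by omega
    have e3 : l2 + (r2 + 1 - l2) = r := by omega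
    rw [e2, e3, segSum_one, segSum_one, hstep2]
    ring
  · -- l odd, r odd
    have e : r + 1 - l = 1 + (r2 + 1 - l2) := by omega
    rw [e, segSum_split t l 1 (r2+1-l2)]
    have e2 : l + 1 = l2 := by omega
    rw [e2, segSum_one, hstep2]
    ring
  · -- l even, r even
    have e : r + 1 - l = (r2 + 1 - l2) + 1 := by omega
    rw [e, segSum_split t l (r2+1-l2) 1]
    have e2 : l + (r2 + 1 - l2) = r := by omega
    have e3 : l = l2 := by omega
    rw [e2, segSum_one, e3, hstep2]
    ring
  · -- l even, r odd
    have e3 : l = l2 := by omega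
    have e4 : r = r2 := by omega
    rw [e3, e4, hstep2]
    ring


theorem qLoop_sum (t : Std.HashMap Nat Int) (hgood : ∀ p, 1 ≤ p → p < 400001 → GoodNode t p) :
    ∀ fuel l r res, 1 ≤ l → r < 2 ^ fuel → r < 800002 →
      qLoop t fuel l r res = res + segSum t l (r + 1 - l) := by
  intro fuel
  induction fuel with
  | zero =>
    intro l r res h1 h2 h3
    have hr0 : r = 0 := by simpa using h2
    have hlen : r + 1 - l = 0 := by omega
    show res = res + segSum t l (r + 1 - l)
    rw [hlen, segSum_zero]
    ring
  | succ fuel ih =>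
    intro l r res h1 h2 h3
    by_cases hlr : l ≤ r
    · have hr1 : 1 ≤ r := by omega
      simp only [qLoop, hlr, if_true]
      set l2 := if l % 2 = 1 then l + 1 else l with hl2
      set r2 := if r % 2 = 0 then r - 1 else r with hr2
      have hl2e : l2 % 2 = 0 := by rw [hl2]; split_ifs <;> omega
      have hl2b : l ≤ l2 ∧ l2 ≤ l + 1 := by rw [hl2]; split_ifs <;> omega
      have hr2b : r - 1 ≤ r2 ∧ r2 ≤ r := by rw [hr2]; split_ifs <;> omega
      have hsh_l : l2 >>> 1 = l2 / 2 := Nat.shiftRight_one l2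
      have hsh_r : r2 >>> 1 = r2 / 2 := Nat.shiftRight_one r2
      have step := qstep_sum t hgood l r h1 hlr h3
      rw [← hl2, ← hr2] at step
      have hpow : 2 ^ (fuel + 1) = 2 * 2 ^ fuel := by ring
      have hsh : ∀ m : Nat, m >>> 1 = m / 2 := Nat.shiftRight_one
      by_cases hl : l % 2 = 1 <;> by_cases hrp : r % 2 = 0 <;>
          simp only [hl, hrp, if_true, if_false] at hl2 hr2 step ⊢
      · rw [ih _ _ _ (by simp only [hsh]; omega) (by simp only [hsh]; omega)
              (by simp only [hsh]; omega)]
        rw [hl2, hr2] at step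
        rw [step]
        ring
      · rw [ih _ _ _ (by simp only [hsh]; omega) (by simp only [hsh]; omega)
              (by simp only [hsh]; omega)]
        rw [hl2, hr2] at step
        rw [step]
        ring
      · rw [ih _ _ _ (by simp only [hsh]; omega) (by simp only [hsh]; omega)
              (by simp only [hsh]; omega)]
        rw [hl2, hr2] at step
        rw [step]
        ring
      · rw [ih _ _ _ (by simp only [hsh]; omega) (by simp only [hsh]; omega)
              (by simp only [hsh]; omega)]
        rw [hl2, hr2] at step
        rw [step]
        ring
    · have : r + 1 - l = 0 := by omega
      simp [qLoop, hlr, this, segSum_zero]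


theorem query_sum (t : Std.HashMap Nat Int) (hgood : ∀ p, 1 ≤ p → p < 400001 → GoodNode t p)
    (a b : Int) (ha : 0 ≤ a) (hb : b ≤ 400000) :
    query 400001 t a b = segSum t (a + 400001).toNat ((b + 1 - a).toNat) := by
  have hcast : ((400001:Nat):Int) = (400001:Int) := by norm_num
  simp only [query, hcast]
  by_cases h : a + (400001 : Int) > b + (400001 : Int)
  · rw [if_pos h]
    have : (b + 1 - a).toNat = 0 := by omega
    rw [this, segSum_zero]
  · rw [if_neg h]
    have h64 : ((b + (400001:Int)).toNat) < 2 ^ 64 := by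
      have : (2:Nat) ^ 64 = 18446744073709551616 := by norm_num
      omega
    rw [qLoop_sum t hgood 64 _ _ _ (by omega) h64 (by omega)]
    have : (b + (400001:Int)).toNat + 1 - (a + (400001:Int)).toNat = (b + 1 - a).toNat := by omega
    rw [this]
    ring


theorem countP_window (M : List Nat) (c len : Nat) :
    M.countP (fun u => decide (c ≤ u ∧ u < c + (len + 1)))
      = M.countP (fun u => decide (c ≤ u ∧ u < c + len)) + M.count (c + len) := by
  induction M with
  | nil => simp
  | cons a M ih =>
    simp only [List.countP_cons, List.count_cons, ih, beq_iff_eq, decide_eq_true_eq]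
    split_ifs <;> omega


theorem leaves_count (t : Std.HashMap Nat Int) (L : List Int) (hok : TreeOk t L) :
    ∀ (len c : Nat), c + len ≤ 400001 →
      segSum t (400001 + c) len = ((L.map idxOf).countP (fun u => decide (c ≤ u ∧ u < c + len)) : Int) := by
  obtain ⟨hgood, hleaf⟩ := hok
  intro len
  induction len with
  | zero =>
    intro c hc
    rw [segSum_zero]
    have hz : (L.map idxOf).countP (fun u => decide (c ≤ u ∧ u < c + 0)) = 0 := by
      rw [List.countP_eq_zero]
      intro u hu
      simp only [decide_eq_true_eq]
      omega
    rw [hz]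
    simp
  | succ len ih =>
    intro c hc
    have hsp : segSum t (400001 + c) (len + 1) = segSum t (400001 + c) len + pvTget t (400001 + (c + len)) := by
      rw [segSum_split t (400001 + c) len 1, segSum_one]
      have : 400001 + c + len = 400001 + (c + len) := by omega
      rw [this]
    rw [hsp, ih c (by omega), hleaf (c + len) (by omega), countP_window]
    push_cast
    ring


theorem query_left (t : Std.HashMap Nat Int) (L : List Int) (hok : TreeOk t L)
    (hL : ∀ v ∈ L, inRangeX v) (x : Int) (hx : inRangeX x) :
    query 400001 t 0 (x + 200000 - 1) = (L.countP (fun v => decide (v < x)) : Int) := by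
  obtain ⟨hx1, hx2⟩ := hx
  rw [query_sum t hok.1 0 (x + 200000 - 1) (by omega) (by omega)]
  have e1 : ((0 : Int) + 400001).toNat = 400001 + 0 := by omega
  have e2 : (x + 200000 - 1 + 1 - 0).toNat = (x + 200000).toNat := by omega
  rw [e1, e2]
  rw [leaves_count t L hok ((x + 200000).toNat) 0 (by omega)]
  rw [List.countP_map]
  congr 1
  apply List.countP_congr
  intro v hv
  have hvr := hL v hv
  obtain ⟨hv1, hv2⟩ := hvr
  simp only [Function.comp_apply, idxOf, decide_eq_true_eq]
  omega


theorem query_right (t : Std.HashMap Nat Int) (L : List Int) (hok : TreeOk t L)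
    (hL : ∀ v ∈ L, inRangeX v) (x : Int) (hx : inRangeX x) :
    query 400001 t (x + 200000 + 1) (400001 - 1) = (L.countP (fun v => decide (x < v)) : Int) := by
  obtain ⟨hx1, hx2⟩ := hx
  rw [query_sum t hok.1 (x + 200000 + 1) (400001 - 1) (by omega) (by omega)]
  have e1 : (x + 200000 + 1 + 400001).toNat = 400001 + (x + 200001).toNat := by omega
  have e2 : ((400001 : Int) - 1 + 1 - (x + 200000 + 1)).toNat = (200000 - x).toNat := by omega
  rw [e1, e2]
  rw [leaves_count t L hok ((200000 - x).toNat) ((x + 200001).toNat) (by omega)]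
  rw [List.countP_map]
  congr 1
  apply List.countP_congr
  intro v hv
  have hvr := hL v hv
  obtain ⟨hv1, hv2⟩ := hvr
  simp only [Function.comp_apply, idxOf, decide_eq_true_eq]
  omega


theorem step_rel (a : Std.HashMap Nat Int × Int × List Int × Int) (b : List Int × List Int × Int × Int)
    (p : Int × Int) (hp : inRangeX p.1) (h : StRel a b) : StRel (stepA a p) (stepB b p) := by
  obtain ⟨tree, curY, temp, res⟩ := a
  obtain ⟨ins, pend, curY', res'⟩ := b
  obtain ⟨hy, ht, hr, hok, hins, hpend⟩ := h
  simp only [StRel] at *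
  subst hy; subst ht; subst hr
  by_cases hc : curY = p.2
  · have hc' : ¬ (p.2 ≠ curY) := by simp [hc.symm]
    simp only [stepA, stepB]
    rw [if_pos hc, if_neg hc']
    refine ⟨rfl, rfl, ?_, hok, hins, ?_⟩
    · have hql := query_left tree ins hok hins p.1 hp
      have hqr := query_right tree ins hok hins p.1 hp
      simp only [hqr, hql]
    · intro v hv
      rcases List.mem_append.mp hv with h1 | h1
      · exact hpend v h1
      · simp at h1; subst h1; exact hp
  · have hc' : (p.2 ≠ curY) := fun hh => hc hh.symm
    simp only [stepA, stepB]
    rw [if_neg hc, if_pos hc']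
    have hok' : TreeOk (temp.foldl (fun t j => update 400001 t (j + 200000).toNat 1) tree) (ins ++ temp) :=
      flush_ok temp tree ins hok hpend
    have hins' : ∀ v ∈ ins ++ temp, inRangeX v := by
      intro v hv
      rcases List.mem_append.mp hv with h1 | h1
      · exact hins v h1
      · exact hpend v h1
    refine ⟨rfl, rfl, ?_, hok', hins', ?_⟩
    · have hql := query_left _ _ hok' hins' p.1 hp
      have hqr := query_right _ _ hok' hins' p.1 hp
      simp only [hqr, hql]
    · intro v hv
      simp at hv; subst hv; exact hp


theorem fold_rel (pts : List (Int × Int)) (hpts : ∀ p ∈ pts, inRangeX p.1) :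
    ∀ a b, StRel a b → StRel (pts.foldl stepA a) (pts.foldl stepB b) := by
  induction pts with
  | nil => intro a b h; simpa using h
  | cons p pts ih =>
    intro a b h
    simp only [List.foldl_cons]
    exact ih (fun q hq => hpts q (by simp [hq])) _ _ (step_rel a b p (hpts p (by simp)) h)


theorem foldl_range_getD {β : Type} (f : β → (Int × Int) → β) (init : β)
    (s : List (Int × Int)) (N : Int) (hN : N ≤ (s.length : Int)) :
    (PySem.List.pyRange 0 N 1).foldl
        (fun acc i => f acc (PySem.List.pyGetD s i ((0 : Int), (0 : Int)))) init =
      (s.take N.toNat).foldl f init := by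
  by_cases hneg : N ≤ 0
  · rw [PySem.List.pyRange_one_eq_nil hneg]
    have : N.toNat = 0 := by omega
    rw [this]
    simp
  · have aux : ∀ n : Nat, n ≤ s.length →
        (PySem.List.pyRange 0 (n : Int) 1).foldl
            (fun acc i => f acc (PySem.List.pyGetD s i ((0 : Int), (0 : Int)))) init =
          (s.take n).foldl f init := by
      intro n
      induction n with
      | zero => intro _; simp [PySem.List.pyRange_one_eq_nil]
      | succ n ih =>
        intro hn
        have hcast : ((n : Int) + 1) = ((n + 1 : Nat) : Int) := by push_cast; ring
        rw [← hcast, PySem.List.pyRange_one_succ_right (by omega), List.foldl_append]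
        rw [ih (by omega)]
        have hlt : n < s.length := by omega
        have hget : PySem.List.pyGetD s (n : Int) ((0 : Int), (0 : Int)) = s[n] := by
          rw [PySem.List.pyGetD_natCast]
          exact List.getD_eq_getElem s _ hlt
        have htake : s.take (n + 1) = s.take n ++ [s[n]] := by
          rw [List.take_add_one]
          simp [List.getElem?_eq_getElem hlt]
        rw [htake, List.foldl_append]
        simp [hget]
    have : N = ((N.toNat : Nat) : Int) := by omega
    rw [this]
    exact aux N.toNat (by omega)


theorem treeok_init : TreeOk ∅ [] := by
  refine ⟨?_, ?_⟩
  · intro p hp1 hp2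
    unfold GoodNode pvTget
    simp
  · intro c hc
    simp [pvTget]


theorem solve_eq (N : Int) (point : List (Int × Int))
    (hlen : N ≤ (point.length : Int))
    (hbound : ∀ p ∈ point, -200000 ≤ p.1 ∧ p.1 ≤ 200000) :
    solve N point = solve_alt N point := by
  simp only [solve, solve_alt]
  have hslen : (PySem.List.sorted2 point (fun p => -p.2) (fun p => p.1)).length = point.length :=
    (PySem.List.sorted2_perm point _ _ false).length_eq
  set s := PySem.List.sorted2 point (fun p => -p.2) (fun p => p.1) with hs
  rw [foldl_range_getD stepA _ s N (by omega), foldl_range_getD stepB _ s N (by omega)]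
  have hpts : ∀ p ∈ s.take N.toNat, inRangeX p.1 := by
    intro p hp
    have : p ∈ s := List.mem_of_mem_take hp
    have : p ∈ point := ((PySem.List.sorted2_perm point _ _ false).mem_iff).mp this
    exact hbound p this
  have hrel := fold_rel (s.take N.toNat) hpts
      ((∅ : Std.HashMap Nat Int), (PySem.List.pyGetD s 0 ((0 : Int), (0 : Int))).2, ([] : List Int), (0 : Int))
      (([] : List Int), ([] : List Int), (PySem.List.pyGetD s 0 ((0 : Int), (0 : Int))).2, (0 : Int))
      ⟨rfl, rfl, rfl, treeok_init, by simp, by simp⟩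
  rw [hrel.2.2.1]


-- ===== VERDICT (by name: the statement is the Claim_ definition above) =====
theorem solve_spec : Claim_equal_solve := by
  intro N point hdom hpre
  obtain ⟨hne, hlen, hbound⟩ := hpre
  unfold Spec_solve
  exact solve_eq N point hlen hbound
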